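-- pv_equiv track=rewrite | github.com/bluejv7/advent-of-code-2022 | 6.py | part1
-- ===== SOURCE A (Python) =====
-- def part1(datastream):
--     chars = {datastream[0]}
--     left = 0
--     right = 1
--     while len(chars) < 4:
--         while datastream[right] in chars:
--             chars.remove(datastream[left])
--             left += 1
--         chars.add(datastream[right])
--         right += 1
--
--     return right
-- ===== SOURCE B (Python) =====
-- def part1(datastream):
--     right = 4
--     while len({datastream[i] for i in range(right - 4, right)}) < 4:
--         right += 1
--     return right
-- ===== Notes on version B (the rewrite author's own statement) =====
-- stated objective: alternative
-- what changed: Replaces the incremental sliding-window set (left pointer, add/remove bookkeeping) by a single pointer that rebuilds the 4-character window set from scratch at each candidate end position and returns the first position where it has 4 distinct elements.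
import Mathlib
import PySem

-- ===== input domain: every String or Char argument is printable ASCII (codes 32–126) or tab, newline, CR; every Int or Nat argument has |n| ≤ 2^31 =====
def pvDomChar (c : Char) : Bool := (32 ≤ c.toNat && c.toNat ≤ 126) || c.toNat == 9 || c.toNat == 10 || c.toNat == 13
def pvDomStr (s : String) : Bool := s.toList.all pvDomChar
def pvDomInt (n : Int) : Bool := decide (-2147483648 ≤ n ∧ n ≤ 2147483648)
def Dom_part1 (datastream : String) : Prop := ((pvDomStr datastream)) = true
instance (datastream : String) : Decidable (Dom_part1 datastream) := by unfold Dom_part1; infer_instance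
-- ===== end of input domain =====

-- B rebuilds the 4-character window set from scratch at each candidate end position instead of
-- maintaining A's sliding set with a left pointer; alternative decomposition, same cost.

-- ===== PORT A =====
-- Every Python index used is ≥ 0, so s[i] is getElem? here (none = IndexError); on inputs where the
-- Python raises (excluded by Pre_) the ports return the junk value 0, and fuel l.length+1 is enough
-- for every terminating run (right < length grows each outer step, left < right each inner step).
def pvAInner (l : List Char) (cs : PySem.Set Char) (left right : Nat) : Nat → Option (PySem.Set Char × Nat)
  | 0 => none
  | fuel + 1 =>
    match l[right]? with
    | none => none
    | some c =>
      if PySem.Set.contains cs c then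
        match l[left]? with
        | none => none
        | some cl =>
          match PySem.Set.remove? cs cl with
          | none => none
          | some cs' => pvAInner l cs' (left + 1) right fuel
      else some (cs, left)

def pvAOuter (l : List Char) (cs : PySem.Set Char) (left right : Nat) : Nat → Option Int
  | 0 => none
  | fuel + 1 =>
    if PySem.Set.len cs < 4 then
      match pvAInner l cs left right (l.length + 1) with
      | none => none
      | some (cs1, left1) =>
        match l[right]? with
        | none => none
        | some c => pvAOuter l (PySem.Set.add cs1 c) left1 (right + 1) fuel
    else some (right : Int)

def part1 (datastream : String) : Int :=
  match datastream.toList[0]? with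
  | none => 0
  | some c0 =>
    (pvAOuter datastream.toList (PySem.Set.ofList [c0]) 0 1 (datastream.toList.length + 1)).getD 0

-- ===== PORT B =====
def pvBGo (l : List Char) (right : Nat) : Nat → Int
  | 0 => 0
  | fuel + 1 =>
    match l[right - 4]?, l[right - 3]?, l[right - 2]?, l[right - 1]? with
    | some a, some b, some c, some d =>
      if PySem.Set.len (PySem.Set.ofList [a, b, c, d]) < 4 then pvBGo l (right + 1) fuel
      else (right : Int)
    | _, _, _, _ => 0

def part1_alt (datastream : String) : Int :=
  pvBGo datastream.toList 4 (datastream.toList.length + 1)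

-- ===== PRECONDITION & SPEC =====
def pvWin (l : List Char) (r : Nat) : List Char := (l.drop (r - 4)).take 4

-- Pre_ excludes exactly the inputs on which Python A raises IndexError (no window of 4 consecutive
-- distinct characters exists, in particular strings shorter than 4); B raises IndexError there too.
def Pre_part1 (datastream : String) : Prop :=
  ∃ r < datastream.toList.length + 1, 4 ≤ r ∧ (pvWin datastream.toList r).Nodup
instance (datastream : String) : Decidable (Pre_part1 datastream) := by unfold Pre_part1; infer_instance

def pvWitness_part1 : String := "abcd"

def Spec_part1 (datastream : String) (out : Int) : Prop := out = part1_alt datastream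
instance (datastream : String) (out : Int) : Decidable (Spec_part1 datastream out) := by unfold Spec_part1; infer_instance

-- ===== CLAIM (what is proved, stated in full; the proofs are below) =====
def Claim_equal_part1 : Prop := ∀ (datastream : String), Dom_part1 datastream → Pre_part1 datastream → Spec_part1 datastream (part1 datastream)

-- ===== LEMMAS AND PROOFS =====

-- l[a:b) as a list; both loops' window states are such segments.
def pvSeg (l : List Char) (a b : Nat) : List Char := (l.drop a).take (b - a)

lemma pvSeg_getElem? (l : List Char) (a b k : Nat) :
    (pvSeg l a b)[k]? = if k < b - a then l[a + k]? else none := by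
  simp [pvSeg, List.getElem?_take, List.getElem?_drop]

lemma pvSeg_length (l : List Char) (a b : Nat) (hb : b ≤ l.length) (hab : a ≤ b) :
    (pvSeg l a b).length = b - a := by
  simp only [pvSeg, List.length_take, List.length_drop]
  omega

lemma pvSeg_self (l : List Char) (a : Nat) : pvSeg l a a = [] := by
  simp [pvSeg]

lemma pvSeg_cons (l : List Char) (a b : Nat) (hab : a < b) (ha : a < l.length) (c : Char)
    (hc : l[a]? = some c) : pvSeg l a b = c :: pvSeg l (a + 1) b := by
  obtain ⟨h, rfl⟩ := List.getElem?_eq_some_iff.1 hc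
  unfold pvSeg
  rw [List.drop_eq_getElem_cons ha]
  have hba : b - a = (b - (a + 1)) + 1 := by omega
  rw [hba, List.take_succ_cons]

lemma pvSeg_split (l : List Char) (a c b : Nat) (hac : a ≤ c) (hcb : c ≤ b) :
    pvSeg l a b = pvSeg l a c ++ pvSeg l c b := by
  unfold pvSeg
  have h : b - a = (c - a) + (b - c) := by omega
  rw [h, List.take_add, List.drop_drop]
  have h2 : a + (c - a) = c := by omega
  rw [h2]

lemma pvSeg_snoc (l : List Char) (a b : Nat) (hab : a ≤ b) (c : Char) (hc : l[b]? = some c) :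
    pvSeg l a (b + 1) = pvSeg l a b ++ [c] := by
  unfold pvSeg
  have h : b + 1 - a = (b - a) + 1 := by omega
  rw [h, List.take_succ]
  congr 1
  rw [List.getElem?_drop]
  have h2 : a + (b - a) = b := by omega
  rw [h2, hc]
  rfl

lemma pvSeg_not_nodup (l : List Char) (a b p q : Nat) (hap : a ≤ p) (hpq : p < q) (hqb : q < b)
    (hbl : b ≤ l.length) (hval : l[p]? = l[q]?) : ¬ (pvSeg l a b).Nodup := by
  intro hnd
  have hlen : (pvSeg l a b).length = b - a := pvSeg_length l a b hbl (by omega)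
  have hne := (List.nodup_iff_getElem?_ne_getElem?).1 hnd (p - a) (q - a)
    (by omega) (by rw [hlen]; omega)
  apply hne
  rw [pvSeg_getElem?, pvSeg_getElem?, if_pos (by omega), if_pos (by omega)]
  have h1 : a + (p - a) = p := by omega
  have h2 : a + (q - a) = q := by omega
  rw [h1, h2, hval]

lemma pvWin_eq_seg (l : List Char) (r : Nat) (h4 : 4 ≤ r) : pvWin l r = pvSeg l (r - 4) r := by
  unfold pvWin pvSeg
  congr 1
  omega

lemma pvWin_eq_four (l : List Char) (r : Nat) (h4 : 4 ≤ r) (hr : r ≤ l.length)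
    (a b c d : Char) (ha : l[r - 4]? = some a) (hb : l[r - 3]? = some b)
    (hc : l[r - 2]? = some c) (hd : l[r - 1]? = some d) : pvWin l r = [a, b, c, d] := by
  rw [pvWin_eq_seg l r h4]
  rw [pvSeg_cons l (r - 4) r (by omega) (by have := List.getElem?_eq_some_iff.1 ha; omega) a ha]
  have e3 : r - 4 + 1 = r - 3 := by omega
  rw [e3, pvSeg_cons l (r - 3) r (by omega) (by have := List.getElem?_eq_some_iff.1 hb; omega) b hb]
  have e2 : r - 3 + 1 = r - 2 := by omega
  rw [e2, pvSeg_cons l (r - 2) r (by omega) (by have := List.getElem?_eq_some_iff.1 hc; omega) c hc]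
  have e1 : r - 2 + 1 = r - 1 := by omega
  rw [e1, pvSeg_cons l (r - 1) r (by omega) (by have := List.getElem?_eq_some_iff.1 hd; omega) d hd]
  have e0 : r - 1 + 1 = r := by omega
  rw [e0, pvSeg_self]

lemma pvOfList_length_lt (xs : List Char) (h : ¬ xs.Nodup) :
    (PySem.Set.ofList xs).length < xs.length := by
  induction xs with
  | nil => simp at h
  | cons x xs ih =>
    rw [PySem.Set.ofList_cons]
    by_cases hx : x ∈ xs
    · have hmem : x ∈ PySem.Set.ofList xs := (PySem.Set.mem_ofList xs x).2 hx
      have hlt : ((PySem.Set.ofList xs).discard x).length < (PySem.Set.ofList xs).length := by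
        unfold PySem.Set.discard
        exact List.length_filter_lt_length_iff_exists.2 ⟨x, hmem, by simp⟩
      have hle := PySem.Set.length_ofList_le xs
      simp only [List.length_cons]
      omega
    · have hnx : ¬ xs.Nodup := fun hn => h (List.nodup_cons.2 ⟨hx, hn⟩)
      have heq : (PySem.Set.ofList xs).discard x = PySem.Set.ofList xs := by
        unfold PySem.Set.discard
        apply List.filter_eq_self.2
        intro a hamem
        have ha : a ∈ xs := (PySem.Set.mem_ofList xs a).1 hamem
        have hne : a ≠ x := fun he => hx (he ▸ ha)
        simp [hne]
      rw [heq]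
      simp only [List.length_cons]
      have := ih hnx
      omega

lemma pvSet4_lt_iff (a b c d : Char) :
    PySem.Set.len (PySem.Set.ofList [a, b, c, d]) < 4 ↔ ¬ [a, b, c, d].Nodup := by
  simp only [PySem.Set.len]
  constructor
  · intro hlt hnd
    rw [PySem.Set.ofList_eq_self_of_nodup _ hnd] at hlt
    norm_num at hlt
  · intro hnd
    have h := pvOfList_length_lt [a, b, c, d] hnd
    have h2 : (PySem.Set.ofList [a, b, c, d]).length < 4 := by simpa using h
    exact_mod_cast h2

lemma pvDiscard_cons_self (x : Char) (s : List Char) (hx : x ∉ s) :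
    PySem.Set.discard (x :: s) x = s := by
  unfold PySem.Set.discard
  rw [List.filter_cons, if_neg (by simp)]
  apply List.filter_eq_self.2
  intro a ha
  have hne : a ≠ x := fun he => hx (he ▸ ha)
  simp [hne]

lemma pvBGo_eq (l : List Char) (R : Nat) (hR4 : 4 ≤ R) (hRn : R ≤ l.length)
    (hRnd : (pvWin l R).Nodup) (hmin : ∀ r, 4 ≤ r → r < R → ¬ (pvWin l r).Nodup) :
    ∀ fuel right, 4 ≤ right → right ≤ R → R - right < fuel →
      pvBGo l right fuel = (R : Int) := by
  intro fuel
  induction fuel with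
  | zero => intro right _ _ hf; omega
  | succ fuel ih =>
    intro right h4 hle hf
    have h1 : right - 4 < l.length := by omega
    have h2 : right - 3 < l.length := by omega
    have h3 : right - 2 < l.length := by omega
    have h0 : right - 1 < l.length := by omega
    have ha := List.getElem?_eq_getElem h1
    have hb := List.getElem?_eq_getElem h2
    have hc := List.getElem?_eq_getElem h3
    have hd := List.getElem?_eq_getElem h0
    have hwin := pvWin_eq_four l right h4 (by omega) _ _ _ _ ha hb hc hd
    simp only [pvBGo, ha, hb, hc, hd]
    by_cases hEq : right = R
    · subst hEq
      rw [if_neg]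
      rw [hwin] at hRnd
      exact fun hlt => (pvSet4_lt_iff _ _ _ _).1 hlt hRnd
    · have hltR : right < R := by omega
      have hnnd : ¬ (pvWin l right).Nodup := hmin right h4 hltR
      rw [hwin] at hnnd
      rw [if_pos ((pvSet4_lt_iff _ _ _ _).2 hnnd)]
      exact ih (right + 1) (by omega) (by omega) (by omega)

lemma pvAInner_eq (l : List Char) (right : Nat) (c : Char) (hc : l[right]? = some c)
    (hrn : right ≤ l.length) :
    ∀ fuel left, left ≤ right → (pvSeg l left right).Nodup → right - left < fuel →
      ∃ left', pvAInner l (pvSeg l left right) left right fuel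
          = some (pvSeg l left' right, left')
        ∧ left ≤ left' ∧ left' ≤ right ∧ c ∉ pvSeg l left' right
        ∧ (left' = left ∨ (left + 1 ≤ left' ∧ l[left' - 1]? = some c)) := by
  intro fuel
  induction fuel with
  | zero => intro left _ _ hf; omega
  | succ fuel ih =>
    intro left hlr hnd hf
    by_cases hmem : c ∈ pvSeg l left right
    · have hltr : left < right := by
        rcases Nat.lt_or_ge left right with h | h
        · exact h
        · exfalso
          have hleq : left = right := by omega
          rw [hleq, pvSeg_self] at hmem
          simp at hmem
      have hll : left < l.length := by omega
      have hcl : l[left]? = some l[left] := List.getElem?_eq_getElem hll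
      have hconseg : pvSeg l left right = l[left] :: pvSeg l (left + 1) right :=
        pvSeg_cons l left right hltr hll _ hcl
      have hcont : PySem.Set.contains (pvSeg l left right) c = true :=
        (PySem.Set.contains_iff _ _).2 hmem
      have hclmem : l[left] ∈ pvSeg l left right := by
        rw [hconseg]; exact List.mem_cons_self
      have hheadnot : l[left] ∉ pvSeg l (left + 1) right := by
        rw [hconseg] at hnd
        exact (List.nodup_cons.1 hnd).1
      have hrem : PySem.Set.remove? (pvSeg l left right) l[left]
          = some (pvSeg l (left + 1) right) := by
        rw [PySem.Set.remove?_of_mem hclmem]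
        congr 1
        rw [hconseg]
        exact pvDiscard_cons_self _ _ hheadnot
      have hnd' : (pvSeg l (left + 1) right).Nodup := by
        rw [hconseg] at hnd
        exact (List.nodup_cons.1 hnd).2
      obtain ⟨left', hrec, hge, hle', hnotmem, hdisj⟩ :=
        ih (left + 1) hltr hnd' (by omega)
      refine ⟨left', ?_, by omega, hle', hnotmem, ?_⟩
      · simp only [pvAInner, hc, hcont, if_true, hcl, hrem]
        exact hrec
      · right
        constructor
        · omega
        · rcases hdisj with rfl | hd2
          · -- no further removal: the removed char is c itself
            have hcc : c = l[left] := by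
              rw [hconseg] at hmem
              rcases List.mem_cons.1 hmem with h | h
              · exact h
              · exact absurd h (by
                  intro hin
                  exact hnotmem hin)
            simp only [Nat.add_sub_cancel]
            rw [hcl, hcc]
          · exact hd2.2
    · have hcont : ¬ PySem.Set.contains (pvSeg l left right) c = true :=
        fun h => hmem ((PySem.Set.contains_iff _ _).1 h)
      refine ⟨left, ?_, le_refl _, hlr, hmem, Or.inl rfl⟩
      simp only [pvAInner, hc, hcont]
      simp

lemma pvAOuter_eq (l : List Char) (R : Nat) (hR4 : 4 ≤ R) (hRn : R ≤ l.length)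
    (hRnd : (pvWin l R).Nodup) (hmin : ∀ r, 4 ≤ r → r < R → ¬ (pvWin l r).Nodup) :
    ∀ fuel left right, left ≤ right → right ≤ R →
      (pvSeg l left right).Nodup → right - left ≤ 4 →
      (left = 0 ∨ (1 ≤ left ∧ ∃ j, left ≤ j ∧ j < right ∧ l[left - 1]? = l[j]?)) →
      R - right < fuel →
      pvAOuter l (pvSeg l left right) left right fuel = some (R : Int) := by
  intro fuel
  induction fuel with
  | zero => intro left right _ _ _ _ _ hf; omega
  | succ fuel ih =>
    intro left right hlr hrR hnd hsz hQ hf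
    have hseglen : (pvSeg l left right).length = right - left :=
      pvSeg_length l left right (by omega) hlr
    by_cases hfull : right - left = 4
    · -- window full: exit, and right must equal R
      have h4r : 4 ≤ right := by omega
      have hleft : right - 4 = left := by clear hQ; omega
      have hwin : pvSeg l left right = pvWin l right := by
        rw [pvWin_eq_seg l right h4r, hleft]
      have hrEq : right = R := by
        by_contra hne
        have hlt : right < R := by omega
        exact hmin right h4r hlt (hwin ▸ hnd)
      subst hrEq
      simp only [pvAOuter]
      rw [if_neg]
      · simp only [PySem.Set.len, hseglen, hfull]
        norm_num
    · -- window not full: right < R, do one outer step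
      have hltR : right < R := by
        by_contra hge
        have hrEq : right = R := by omega
        subst hrEq
        rcases hQ with h0 | ⟨h1, j, hj1, hj2, hj3⟩
        · omega
        · exact (pvSeg_not_nodup l (right - 4) right (left - 1) j (by omega) (by omega) hj2
            (by omega) hj3) (by rw [← pvWin_eq_seg l right hR4]; exact hRnd)
      have hcll : right < l.length := by omega
      have hc : l[right]? = some l[right] := List.getElem?_eq_getElem hcll
      obtain ⟨left', hInner, hll', hlr', hnotmem, hdisj⟩ :=
        pvAInner_eq l right l[right] hc (by omega) (l.length + 1) left hlr hnd (by omega)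
      have hsegnd' : (pvSeg l left' right).Nodup := by
        rw [pvSeg_split l left left' right hll' hlr'] at hnd
        exact hnd.of_append_right
      have hadd : PySem.Set.add (pvSeg l left' right) l[right] = pvSeg l left' (right + 1) := by
        rw [PySem.Set.add_of_not_mem hnotmem]
        exact (pvSeg_snoc l left' right hlr' l[right] hc).symm
      simp only [pvAOuter]
      have hlt4 : PySem.Set.len (pvSeg l left right) < 4 := by
        simp only [PySem.Set.len, hseglen]
        omega
      rw [if_pos hlt4]
      simp only [hInner, hc]
      rw [hadd]
      have hnd2 : (pvSeg l left' (right + 1)).Nodup := by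
        rw [pvSeg_snoc l left' right hlr' l[right] hc]
        refine List.nodup_append.2 ⟨hsegnd', by simp, ?_⟩
        intro a hamem b hbmem
        simp only [List.mem_singleton] at hbmem
        subst hbmem
        exact fun he => hnotmem (he ▸ hamem)
      have hQ2 : left' = 0 ∨ (1 ≤ left' ∧ ∃ j, left' ≤ j ∧ j < right + 1 ∧ l[left' - 1]? = l[j]?) := by
        rcases hdisj with rfl | ⟨hge1, hldup⟩
        · rcases hQ with h0 | ⟨h1, j, hj1, hj2, hj3⟩
          · exact Or.inl h0
          · exact Or.inr ⟨h1, j, hj1, by omega, hj3⟩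
        · refine Or.inr ⟨by omega, right, hlr', by omega, ?_⟩
          rw [hldup, hc]
      have e1 : left' ≤ right + 1 := by omega
      have e2 : right + 1 ≤ R := by omega
      have e3 : right + 1 - left' ≤ 4 := by clear hQ hQ2; omega
      have e4 : R - (right + 1) < fuel := by omega
      exact ih left' (right + 1) e1 e2 hnd2 e3 hQ2 e4

-- ===== VERDICT (by name: the statement is the Claim_ definition above) =====
theorem part1_spec : Claim_equal_part1 := by
  intro ds _ hpre
  unfold Spec_part1
  obtain ⟨r0, hr0lt, hr04, hr0nd⟩ := hpre
  have hex : ∃ r, 4 ≤ r ∧ r ≤ ds.toList.length ∧ (pvWin ds.toList r).Nodup :=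
    ⟨r0, hr04, by omega, hr0nd⟩
  obtain ⟨hR4, hRn, hRnd⟩ := Nat.find_spec hex
  have hmin : ∀ r, 4 ≤ r → r < Nat.find hex → ¬ (pvWin ds.toList r).Nodup := by
    intro r h4 hlt hnd
    exact Nat.find_min hex hlt ⟨h4, by omega, hnd⟩
  have h0 : (0 : Nat) < ds.toList.length := by omega
  have hc0 : ds.toList[0]? = some ds.toList[0] := List.getElem?_eq_getElem h0
  have hseg01 : pvSeg ds.toList 0 1 = [ds.toList[0]] := by
    rw [pvSeg_cons ds.toList 0 1 (by omega) h0 _ hc0, pvSeg_self]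
  have hofl : PySem.Set.ofList [ds.toList[0]] = [ds.toList[0]] :=
    PySem.Set.ofList_eq_self_of_nodup _ (by simp)
  have hA : part1 ds = (Nat.find hex : Int) := by
    unfold part1
    simp only [hc0]
    rw [hofl, ← hseg01]
    rw [pvAOuter_eq ds.toList (Nat.find hex) hR4 hRn hRnd hmin (ds.toList.length + 1) 0 1
      (by omega) (by omega) (by rw [hseg01]; simp) (by omega) (Or.inl rfl) (by omega)]
    rfl
  have hB : part1_alt ds = (Nat.find hex : Int) := by
    unfold part1_alt
    exact pvBGo_eq ds.toList (Nat.find hex) hR4 hRn hRnd hmin (ds.toList.length + 1) 4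
      (by omega) hR4 (by omega)
  rw [hA, hB]
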